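-- pv_equiv track=rewrite | github.com/danieleschmidt/photonic-mlir-synth-bridge | python/photonic_mlir/adaptive_ml.py | _is_valid_pass_name
-- ===== SOURCE A (Python) =====
-- def _is_valid_pass_name(pass_name: str) -> bool:
--     """Security check for optimization pass names."""
--     if not isinstance(pass_name, str) or len(pass_name) > 100:
--         return False
--
--     # Only allow alphanumeric characters and underscores
--     if not all(c.isalnum() or c == '_' for c in pass_name):
--         return False
--
--     # Check against whitelist of known optimization passes
--     valid_passes = {
--         "wavelength_allocation", "thermal_optimization", "power_gating",
--         "phase_quantization", "noise_reduction", "layout_optimization",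
--         "coherent_optimization", "nonlinear_compensation", "dispersion_management",
--         "topology_analysis", "wavelength_crosstalk_mitigation", "advanced_thermal_management",
--         "basic_validation", "performance_profiling", "error_correction"
--     }
--
--     return pass_name in valid_passes
-- ===== SOURCE B (Python) =====
-- # Sorted whitelist + hand-rolled binary search (bisect_left) instead of
-- # length/charset prefilters + hash-set membership.
-- _SORTED_PASSES = (
--     "advanced_thermal_management", "basic_validation", "coherent_optimization",
--     "dispersion_management", "error_correction", "layout_optimization",
--     "noise_reduction", "nonlinear_compensation", "performance_profiling",
--     "phase_quantization", "power_gating", "thermal_optimization",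
--     "topology_analysis", "wavelength_allocation", "wavelength_crosstalk_mitigation",
-- )
--
-- def _is_valid_pass_name(pass_name: str) -> bool:
--     """Security check for optimization pass names."""
--     if not isinstance(pass_name, str):
--         return False
--     lo, hi = 0, len(_SORTED_PASSES)
--     while lo < hi:
--         mid = (lo + hi) // 2
--         if _SORTED_PASSES[mid] < pass_name:
--             lo = mid + 1
--         else:
--             hi = mid
--     return lo < len(_SORTED_PASSES) and _SORTED_PASSES[lo] == pass_name
-- ===== Notes on version B (the rewrite author's own statement) =====
-- stated objective: alternative
-- what changed: Replaced A's length bound, per-character charset scan and hash-set membership by a binary search (hand-rolled bisect_left) over the whitelist stored as a sorted tuple, followed by one equality check.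
import Mathlib
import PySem

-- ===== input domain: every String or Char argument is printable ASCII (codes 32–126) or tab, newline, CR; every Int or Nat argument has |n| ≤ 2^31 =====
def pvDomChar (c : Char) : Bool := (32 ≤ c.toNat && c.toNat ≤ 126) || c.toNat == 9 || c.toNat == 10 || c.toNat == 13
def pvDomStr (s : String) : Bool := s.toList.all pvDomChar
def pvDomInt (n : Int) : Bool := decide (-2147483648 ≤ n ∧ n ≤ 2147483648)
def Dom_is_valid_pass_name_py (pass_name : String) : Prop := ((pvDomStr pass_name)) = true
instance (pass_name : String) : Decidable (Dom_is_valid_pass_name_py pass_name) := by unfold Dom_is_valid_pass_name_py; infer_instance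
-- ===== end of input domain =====

-- B replaces A's length/charset prefilters + set membership by a hand-rolled binary search (bisect_left) over the sorted whitelist (objective: alternative).
-- ===== PORT A =====
def validPasses : PySem.Set String := PySem.Set.ofList
  ["wavelength_allocation", "thermal_optimization", "power_gating",
   "phase_quantization", "noise_reduction", "layout_optimization",
   "coherent_optimization", "nonlinear_compensation", "dispersion_management",
   "topology_analysis", "wavelength_crosstalk_mitigation", "advanced_thermal_management",
   "basic_validation", "performance_profiling", "error_correction"]

def is_valid_pass_name_py (pass_name : String) : Bool :=
  if PySem.Str.len pass_name > 100 then false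
  else if !(pass_name.toList.all fun c => PySem.Chars.isalnum c || c == '_') then false
  else PySem.Set.contains validPasses pass_name

-- ===== PORT B =====
def sortedPasses : List String :=
  ["advanced_thermal_management", "basic_validation", "coherent_optimization",
   "dispersion_management", "error_correction", "layout_optimization",
   "noise_reduction", "nonlinear_compensation", "performance_profiling",
   "phase_quantization", "power_gating", "thermal_optimization",
   "topology_analysis", "wavelength_allocation", "wavelength_crosstalk_mitigation"]

-- Python's 's < t' on str: code-point lexicographic comparison (exact per PYSEM: '<' on str is '<' on s.toList)
def pyStrLt (a b : String) : Bool := List.lex a.toList b.toList (fun c d => c < d)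

-- hand port of Source B's while-loop; lo and hi stay nonnegative, so Python's '//' is Nat
-- division and every index probed is in range — exact on that domain
def bisectLeft (l : List String) (x : String) (lo hi : Nat) : Nat :=
  if lo < hi then
    let mid := (lo + hi) / 2
    if pyStrLt (l.getD mid "") x then bisectLeft l x (mid + 1) hi else bisectLeft l x lo mid
  else lo
termination_by hi - lo
decreasing_by all_goals omega

def is_valid_pass_name_py_alt (pass_name : String) : Bool :=
  let i := bisectLeft sortedPasses pass_name 0 sortedPasses.length
  decide (i < sortedPasses.length) && (sortedPasses.getD i "" == pass_name)

-- ===== PRECONDITION & SPEC =====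
def Spec_is_valid_pass_name_py (pass_name : String) (out : Bool) : Prop := out = is_valid_pass_name_py_alt pass_name
instance (pass_name : String) (out : Bool) : Decidable (Spec_is_valid_pass_name_py pass_name out) := by unfold Spec_is_valid_pass_name_py; infer_instance

-- ===== CLAIM (what is proved, stated in full; the proofs are below) =====
def Claim_equal_is_valid_pass_name_py : Prop := ∀ (pass_name : String), Dom_is_valid_pass_name_py pass_name → Spec_is_valid_pass_name_py pass_name (is_valid_pass_name_py pass_name)

-- ===== LEMMAS AND PROOFS =====
theorem validPasses_eq : (validPasses : List String) = ["wavelength_allocation", "thermal_optimization", "power_gating", "phase_quantization", "noise_reduction", "layout_optimization", "coherent_optimization", "nonlinear_compensation", "dispersion_management", "topology_analysis", "wavelength_crosstalk_mitigation", "advanced_thermal_management", "basic_validation", "performance_profiling", "error_correction"] := by decide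

-- whitelist members are short and alnum/underscore, so A's prefilters never reject them
theorem validPasses_wellformed (s : String) (h : PySem.Set.contains validPasses s = true) :
    (PySem.Str.len s > 100) = False ∧ (s.toList.all fun c => PySem.Chars.isalnum c || c == '_') = true := by
  have hmem : s ∈ (validPasses : List String) := by simpa [PySem.Set.contains] using h
  rw [validPasses_eq] at hmem
  simp only [List.mem_cons, List.not_mem_nil, or_false] at hmem
  rcases hmem with rfl|rfl|rfl|rfl|rfl|rfl|rfl|rfl|rfl|rfl|rfl|rfl|rfl|rfl|rfl <;>
    exact ⟨by decide, by decide⟩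

theorem pyStrLt_iff (a b : String) : pyStrLt a b = true ↔ List.Lex (· < ·) a.toList b.toList := by
  unfold pyStrLt
  rw [List.lex_eq_true_iff_lex]
  simp

theorem pyStrLt_irrefl (a : String) : pyStrLt a a = false := by
  cases h : pyStrLt a a
  · rfl
  · exact absurd ((pyStrLt_iff a a).mp h) (List.lex_irrefl (fun x => lt_irrefl x) a.toList)

theorem pyStrLt_trans (a b c : String) (h1 : pyStrLt a b = true) (h2 : pyStrLt b c = true) :
    pyStrLt a c = true := by
  exact (pyStrLt_iff a c).mpr
    (List.lex_trans (fun hxy hyz => lt_trans hxy hyz) ((pyStrLt_iff a b).mp h1) ((pyStrLt_iff b c).mp h2))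

theorem pyStrLt_antisymm (a b : String) (h1 : pyStrLt a b = false) (h2 : pyStrLt b a = false) :
    a = b := by
  have na : ¬ List.Lex (· < ·) a.toList b.toList := fun hl => by
    rw [(pyStrLt_iff a b).mpr hl] at h1; exact Bool.noConfusion h1
  have nb : ¬ List.Lex (· < ·) b.toList a.toList := fun hl => by
    rw [(pyStrLt_iff b a).mpr hl] at h2; exact Bool.noConfusion h2
  have := List.lex_trichotomous
    (r := fun x y : Char => x < y)
    (fun x y hxy hyx => le_antisymm (not_lt.mp hyx) (not_lt.mp hxy)) nb na
  exact String.toList_inj.mp this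

-- bisect_left invariant on a strictly sorted list: everything left of the result is < x,
-- nothing from the result on (within [_, hi)) is
theorem bisect_inv (l : List String) (x : String)
    (hs : ∀ j, j < l.length → ∀ i, i < j → pyStrLt (l.getD i "") (l.getD j "") = true)
    (lo hi : Nat) :
    lo ≤ hi → hi ≤ l.length →
      lo ≤ bisectLeft l x lo hi ∧ bisectLeft l x lo hi ≤ hi ∧
      (∀ j, lo ≤ j → j < bisectLeft l x lo hi → pyStrLt (l.getD j "") x = true) ∧
      (∀ j, bisectLeft l x lo hi ≤ j → j < hi → pyStrLt (l.getD j "") x = false) := by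
  fun_induction bisectLeft l x lo hi with
  | case1 lo hi h mid hlt ih =>
    intro hlh hhi
    obtain ⟨i1, i2, i3, i4⟩ := ih (by omega) hhi
    refine ⟨by omega, i2, ?_, i4⟩
    intro j hj1 hj2
    by_cases hjm : j < mid
    · exact pyStrLt_trans _ _ _ (hs mid (by omega) j hjm) hlt
    · by_cases hje : j = mid
      · exact hje ▸ hlt
      · exact i3 j (by omega) hj2
  | case2 lo hi h mid hlt ih =>
    intro hlh hhi
    obtain ⟨i1, i2, i3, i4⟩ := ih (by omega) (by omega)
    refine ⟨i1, by omega, i3, ?_⟩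
    intro j hj1 hj2
    by_cases hjm : j < mid
    · exact i4 j hj1 hjm
    · cases hc : pyStrLt (l.getD j "") x
      · rfl
      · exfalso
        by_cases hje : j = mid
        · exact hlt (hje ▸ hc)
        · exact hlt (pyStrLt_trans _ _ _ (hs j (by omega) mid (by omega)) hc)
  | case3 lo hi h =>
    intro hlh hhi
    exact ⟨le_refl _, by omega, fun j h1 h2 => absurd (lt_of_le_of_lt h1 h2) (lt_irrefl lo),
           fun j h1 h2 => by omega⟩

theorem sortedPasses_sorted :
    ∀ j, j < sortedPasses.length → ∀ i, i < j →
      pyStrLt (sortedPasses.getD i "") (sortedPasses.getD j "") = true := by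
  have : ∀ j, j < sortedPasses.length → ∀ i, i < sortedPasses.length → i < j →
      pyStrLt (sortedPasses.getD i "") (sortedPasses.getD j "") = true := by decide
  exact fun j hj i hij => this j hj i (by omega) hij

theorem mem_sorted_iff_mem_valid (x : String) :
    x ∈ sortedPasses ↔ x ∈ (validPasses : List String) := by
  rw [validPasses_eq]
  simp only [sortedPasses, List.mem_cons, List.not_mem_nil, or_false]
  tauto

theorem alt_eq_contains (x : String) :
    is_valid_pass_name_py_alt x = PySem.Set.contains validPasses x := by
  have key : is_valid_pass_name_py_alt x = true ↔ x ∈ (validPasses : List String) := by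
    rw [← mem_sorted_iff_mem_valid]
    unfold is_valid_pass_name_py_alt
    obtain ⟨i1, i2, i3, i4⟩ :=
      bisect_inv sortedPasses x sortedPasses_sorted 0 sortedPasses.length
        (by omega) (le_refl _)
    set i := bisectLeft sortedPasses x 0 sortedPasses.length with hi
    simp only [Bool.and_eq_true, decide_eq_true_eq, beq_iff_eq]
    constructor
    · rintro ⟨hlen, hget⟩
      rw [← hget, List.getD_eq_getElem?_getD, List.getElem?_eq_getElem hlen]
      exact List.getElem_mem hlen
    · intro hmem
      obtain ⟨k, hk, hke⟩ := List.mem_iff_getElem.mp hmem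
      have hkd : sortedPasses.getD k "" = x := by
        rw [List.getD_eq_getElem?_getD, List.getElem?_eq_getElem hk, Option.getD_some, hke]
      by_cases hki : k < i
      · exfalso
        have := i3 k (by omega) hki
        rw [hkd] at this
        rw [pyStrLt_irrefl x] at this
        exact Bool.noConfusion this
      · have hilen : i < sortedPasses.length := by omega
        refine ⟨hilen, ?_⟩
        have hfi : pyStrLt (sortedPasses.getD i "") x = false := i4 i (le_refl _) hilen
        have hxi : pyStrLt x (sortedPasses.getD i "") = false := by
          cases hc : pyStrLt x (sortedPasses.getD i "")
          · rfl
          · exfalso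
            by_cases hik : i = k
            · rw [hik, hkd] at hc; rw [pyStrLt_irrefl x] at hc; exact Bool.noConfusion hc
            · have hlt := sortedPasses_sorted k hk i (by omega)
              have hxx := pyStrLt_trans _ _ _ hc hlt
              rw [hkd, pyStrLt_irrefl x] at hxx
              exact Bool.noConfusion hxx
        exact pyStrLt_antisymm _ _ hfi hxi
  cases hB : PySem.Set.contains validPasses x
  · cases hA : is_valid_pass_name_py_alt x
    · rfl
    · exfalso
      have hm := key.mp hA
      have : PySem.Set.contains validPasses x = true := by
        simpa [PySem.Set.contains] using hm
      rw [this] at hB; exact Bool.noConfusion hB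
  · have hm : x ∈ (validPasses : List String) := by simpa [PySem.Set.contains] using hB
    exact key.mpr hm

-- ===== VERDICT (by name: the statement is the Claim_ definition above) =====
theorem is_valid_pass_name_py_spec : Claim_equal_is_valid_pass_name_py := by
  intro s _
  unfold Spec_is_valid_pass_name_py is_valid_pass_name_py
  rw [alt_eq_contains]
  by_cases hmem : PySem.Set.contains validPasses s = true
  · obtain ⟨h1, h2⟩ := validPasses_wellformed s hmem
    split_ifs with ha hb
    · exact absurd ha (by rw [h1]; exact id)
    · rw [h2] at hb; exact absurd hb (by decide)
    · rfl
  · have hf : PySem.Set.contains validPasses s = false := by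
      cases hc : PySem.Set.contains validPasses s
      · rfl
      · exact absurd hc hmem
    split_ifs <;> first | rfl | exact hf.symm
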